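-- pv_equiv track=rewrite | github.com/MarekLipan/AoC | years/2015/day_3/task_2.py | solution
-- ===== SOURCE A (Python) =====
-- from typing import List
--
-- def solution(inp: List[str]):
--     """Placeholder for the solution function"""
--
--     visited_houses = set()
--     current_position = (0, 0)
--     robo_current_position = (0, 0)
--
--     visited_houses.add(current_position)
--
--     for i, direction in enumerate(inp[0]):
--         if i % 2 == 0:
--             if direction == "^":
--                 current_position = (current_position[0], current_position[1] + 1)
--             elif direction == "v":
--                 current_position = (current_position[0], current_position[1] - 1)
--             elif direction == ">":
--                 current_position = (current_position[0] + 1, current_position[1])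
--             elif direction == "<":
--                 current_position = (current_position[0] - 1, current_position[1])
--
--             visited_houses.add(current_position)
--         elif i % 2 == 1:
--             if direction == "^":
--                 robo_current_position = (
--                     robo_current_position[0],
--                     robo_current_position[1] + 1,
--                 )
--             elif direction == "v":
--                 robo_current_position = (
--                     robo_current_position[0],
--                     robo_current_position[1] - 1,
--                 )
--             elif direction == ">":
--                 robo_current_position = (
--                     robo_current_position[0] + 1,
--                     robo_current_position[1],
--                 )
--             elif direction == "<":
--                 robo_current_position = (
--                     robo_current_position[0] - 1,
--                     robo_current_position[1],
--                 )
--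
--             visited_houses.add(robo_current_position)
--
--     result = len(visited_houses)
--
--     return result
-- ===== SOURCE B (Python) =====
-- from typing import List
--
--
-- def solution(inp: List[str]):
--     """Count distinct houses visited by the two alternating agents."""
--     delta = {"^": (0, 1), "v": (0, -1), ">": (1, 0), "<": (-1, 0)}
--     moves = inp[0]
--     houses = {(0, 0)}
--     for stream in (moves[::2], moves[1::2]):
--         x, y = 0, 0
--         for c in stream:
--             dx, dy = delta.get(c, (0, 0))
--             x, y = x + dx, y + dy
--             houses.add((x, y))
--     return len(houses)
-- ===== Notes on version B (the rewrite author's own statement) =====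
-- stated objective: simpler
-- what changed: Instead of one interleaved loop keeping two positions and branching on index parity and on each arrow, B splits the move string into the two parity streams ([::2] and [1::2]), walks each stream independently with a delta lookup table, and returns the size of the accumulated set.
-- outside the precondition, e.g. on solution([]): A raises IndexError, B raises IndexError
import Mathlib
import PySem

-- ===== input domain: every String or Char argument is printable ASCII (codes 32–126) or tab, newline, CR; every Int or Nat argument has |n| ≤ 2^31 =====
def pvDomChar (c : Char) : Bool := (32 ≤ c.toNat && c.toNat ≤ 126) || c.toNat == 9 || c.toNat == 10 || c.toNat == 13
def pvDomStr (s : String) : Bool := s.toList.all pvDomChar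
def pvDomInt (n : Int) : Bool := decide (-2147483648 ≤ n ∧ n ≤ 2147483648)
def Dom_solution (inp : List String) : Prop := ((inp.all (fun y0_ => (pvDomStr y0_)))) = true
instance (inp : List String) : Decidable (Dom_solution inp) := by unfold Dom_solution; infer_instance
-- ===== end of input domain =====

-- B replaces A's single interleaved parity loop by splitting the moves into the two
-- parity streams and walking each independently with a delta lookup table (objective: simpler).


-- ===== PORT A =====
-- A's loop state: (visited_houses, current_position, robo_current_position);
-- one fold over enumerate(inp[0]), branching on i % 2 and on the arrow, exactly as A does.
def solutionStepA (direction : Char) (p : Int × Int) : Int × Int :=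
  if direction = '^' then (p.1, p.2 + 1)
  else if direction = 'v' then (p.1, p.2 - 1)
  else if direction = '>' then (p.1 + 1, p.2)
  else if direction = '<' then (p.1 - 1, p.2)
  else p

def solution (inp : List String) : Int :=
  -- inp[0]: total form pyGetD; Pre_solution excludes the IndexError case inp = []
  let st :=
    (PySem.List.enumerate (PySem.List.pyGetD inp 0 "").toList).foldl
      (fun (st : PySem.Set (Int × Int) × (Int × Int) × (Int × Int)) id =>
        let (vis, cur, robo) := st
        if PySem.Int.mod id.1 2 = 0 then
          let cur' := solutionStepA id.2 cur
          (vis.add cur', cur', robo)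
        else
          let robo' := solutionStepA id.2 robo
          (vis.add robo', cur, robo'))
      (PySem.Set.add PySem.Set.empty ((0 : Int), (0 : Int)), ((0 : Int), (0 : Int)), ((0 : Int), (0 : Int)))
  PySem.Set.len st.1

-- ===== PORT B =====
def solutionDelta : PySem.Dict Char (Int × Int) :=
  ((((PySem.Dict.empty).insert '^' ((0 : Int), (1 : Int))).insert 'v' (0, -1)).insert '>' (1, 0)).insert '<' (-1, 0)

-- exact port of the pair of step-2 slices (moves[::2], moves[1::2])
def solutionSplit2 {α : Type} : List α → List α × List α
  | [] => ([], [])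
  | c :: cs => (c :: (solutionSplit2 cs).2, (solutionSplit2 cs).1)

-- the inner 'for c in stream' loop of B: fold carrying (houses, (x, y))
def solutionWalk (houses : PySem.Set (Int × Int)) (start : Int × Int) (stream : List Char) :
    PySem.Set (Int × Int) :=
  (stream.foldl
    (fun (st : PySem.Set (Int × Int) × (Int × Int)) c =>
      let d := solutionDelta.getD c (0, 0)
      let p := (st.2.1 + d.1, st.2.2 + d.2)
      (st.1.add p, p))
    (houses, start)).1

def solution_alt (inp : List String) : Int :=
  let moves := (PySem.List.pyGetD inp 0 "").toList
  let streams := solutionSplit2 moves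
  let houses : PySem.Set (Int × Int) := PySem.Set.ofList [((0 : Int), (0 : Int))]
  let houses := solutionWalk houses (0, 0) streams.1
  let houses := solutionWalk houses (0, 0) streams.2
  PySem.Set.len houses

-- ===== PRECONDITION & SPEC =====
-- A evaluates inp[0]: on inp = [] it raises IndexError, so the empty list is excluded.
def Pre_solution (inp : List String) : Prop := inp ≠ []
instance (inp : List String) : Decidable (Pre_solution inp) := by unfold Pre_solution; infer_instance
def pvWitness_solution : List String := ["^>v<^^"]

def Spec_solution (inp : List String) (out : Int) : Prop := out = solution_alt inp
instance (inp : List String) (out : Int) : Decidable (Spec_solution inp out) := by unfold Spec_solution; infer_instance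

-- ===== CLAIM (what is proved, stated in full; the proofs are below) =====
def Claim_equal_solution : Prop :=
  ∀ (inp : List String), Dom_solution inp → Pre_solution inp → Spec_solution inp (solution inp)

-- ===== LEMMAS AND PROOFS =====

-- positions visited, alternating between the active agent a and the waiting agent b
def solPosG : List Char → (Int × Int) → (Int × Int) → List (Int × Int)
  | [], _, _ => []
  | d :: ds, a, b => solutionStepA d a :: solPosG ds b (solutionStepA d a)

-- positions visited by a single agent along a stream
def solPos : (Int × Int) → List Char → List (Int × Int)
  | _, [] => []
  | p, d :: ds => solutionStepA d p :: solPos (solutionStepA d p) ds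

-- swap-style reformulation of A's fold (active agent first)
def solG : List Char → PySem.Set (Int × Int) → (Int × Int) → (Int × Int) → PySem.Set (Int × Int)
  | [], vis, _, _ => vis
  | d :: ds, vis, a, b => solG ds (vis.add (solutionStepA d a)) b (solutionStepA d a)

lemma solG_mem (cs : List Char) (vis : PySem.Set (Int × Int)) (a b y : Int × Int) :
    y ∈ solG cs vis a b ↔ y ∈ vis ∨ y ∈ solPosG cs a b := by
  induction cs generalizing vis a b with
  | nil => simp [solG, solPosG]
  | cons d ds ih =>
      simp [solG, solPosG, ih, PySem.Set.mem_add]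
      tauto

lemma solG_nodup (cs : List Char) (vis : PySem.Set (Int × Int)) (a b : Int × Int)
    (h : vis.Nodup) : (solG cs vis a b).Nodup := by
  induction cs generalizing vis a b with
  | nil => exact h
  | cons d ds ih => exact ih _ _ _ (PySem.Set.nodup_add vis _ h)

-- A's enumerate fold equals the swap-style recursion (parity of the start index decides roles)
lemma solutionFold_eq_solG (cs : List Char) (n : Int) (hn : 0 ≤ n)
    (vis : PySem.Set (Int × Int)) (c r : Int × Int) :
    ((PySem.List.enumerate cs n).foldl
      (fun (st : PySem.Set (Int × Int) × (Int × Int) × (Int × Int)) id =>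
        let (vis, cur, robo) := st
        if PySem.Int.mod id.1 2 = 0 then
          let cur' := solutionStepA id.2 cur
          (vis.add cur', cur', robo)
        else
          let robo' := solutionStepA id.2 robo
          (vis.add robo', cur, robo'))
      (vis, c, r)).1
    = if PySem.Int.mod n 2 = 0 then solG cs vis c r else solG cs vis r c := by
  induction cs generalizing n vis c r with
  | nil => simp [PySem.List.enumerate, solG]
  | cons d ds ih =>
      have h2 : PySem.Int.mod n 2 = n % 2 := PySem.Int.mod_eq_emod_of_pos (by omega)
      have h2' : PySem.Int.mod (n + 1) 2 = (n + 1) % 2 := PySem.Int.mod_eq_emod_of_pos (by omega)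
      rcases Int.emod_two_eq_zero_or_one n with hp | hp
      · have hodd : (n + 1) % 2 = 1 := by omega
        simp only [PySem.List.enumerate, List.foldl_cons, h2, hp]
        have := ih (n + 1) (by omega) (vis.add (solutionStepA d c)) (solutionStepA d c) r
        simp only [h2', hodd] at this
        simpa [PySem.List.enumerate, solG] using this
      · have heven : (n + 1) % 2 = 0 := by omega
        simp only [PySem.List.enumerate, List.foldl_cons, h2, hp]
        have := ih (n + 1) (by omega) (vis.add (solutionStepA d r)) c (solutionStepA d r)
        simp only [h2', heven] at this
        simpa [PySem.List.enumerate, solG] using this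

-- B's delta lookup computes exactly A's if-chain step
lemma solutionDelta_step (c : Char) (p : Int × Int) :
    (p.1 + (solutionDelta.getD c (0, 0)).1, p.2 + (solutionDelta.getD c (0, 0)).2)
      = solutionStepA c p := by
  by_cases h1 : c = '^' <;> by_cases h2 : c = 'v' <;> by_cases h3 : c = '>' <;>
    by_cases h4 : c = '<' <;>
  simp_all [solutionDelta, solutionStepA, PySem.Dict.getD_insert, PySem.Dict.getD_empty] <;> omega

lemma solutionWalk_fold (houses : PySem.Set (Int × Int)) (p : Int × Int) (cs : List Char) :
    solutionWalk houses p cs =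
      match cs with
      | [] => houses
      | d :: ds => solutionWalk (houses.add (solutionStepA d p)) (solutionStepA d p) ds := by
  cases cs with
  | nil => rfl
  | cons d ds =>
      simp only [solutionWalk, List.foldl_cons]
      rw [solutionDelta_step]

lemma solutionWalk_mem (cs : List Char) (houses : PySem.Set (Int × Int)) (p y : Int × Int) :
    y ∈ solutionWalk houses p cs ↔ y ∈ houses ∨ y ∈ solPos p cs := by
  induction cs generalizing houses p with
  | nil => simp [solutionWalk, solPos]
  | cons d ds ih =>
      rw [solutionWalk_fold]
      simp only [solPos, List.mem_cons]
      rw [ih]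
      simp [PySem.Set.mem_add]
      tauto

lemma solutionWalk_nodup (cs : List Char) (houses : PySem.Set (Int × Int)) (p : Int × Int)
    (h : houses.Nodup) : (solutionWalk houses p cs).Nodup := by
  induction cs generalizing houses p with
  | nil => exact h
  | cons d ds ih =>
      rw [solutionWalk_fold]
      exact ih _ _ (PySem.Set.nodup_add houses _ h)

-- the interleaved positions are exactly the two split streams' positions
lemma solPosG_split (cs : List Char) (a b y : Int × Int) :
    y ∈ solPosG cs a b ↔
      y ∈ solPos a (solutionSplit2 cs).1 ∨ y ∈ solPos b (solutionSplit2 cs).2 := by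
  induction cs generalizing a b with
  | nil => simp [solPosG, solutionSplit2, solPos]
  | cons d ds ih =>
      simp only [solPosG, List.mem_cons, solutionSplit2, solPos]
      rw [ih b (solutionStepA d a)]
      tauto

-- ===== VERDICT (by name: the statement is the Claim_ definition above) =====
theorem solution_spec : Claim_equal_solution := by
  intro inp _ _
  unfold Spec_solution solution solution_alt
  show PySem.Set.len
      (((PySem.List.enumerate (PySem.List.pyGetD inp 0 "").toList).foldl
        (fun (st : PySem.Set (Int × Int) × (Int × Int) × (Int × Int)) id =>
          let (vis, cur, robo) := st
          if PySem.Int.mod id.1 2 = 0 then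
            let cur' := solutionStepA id.2 cur
            (vis.add cur', cur', robo)
          else
            let robo' := solutionStepA id.2 robo
            (vis.add robo', cur, robo'))
        (PySem.Set.add PySem.Set.empty ((0 : Int), (0 : Int)), ((0 : Int), (0 : Int)), ((0 : Int), (0 : Int)))).1)
    = _
  rw [solutionFold_eq_solG _ 0 (by omega), if_pos (show PySem.Int.mod 0 2 = 0 by decide)]
  have h1 : (solG (PySem.List.pyGetD inp 0 "").toList
      (PySem.Set.add PySem.Set.empty ((0 : Int), (0 : Int))) (0, 0) (0, 0)).Nodup :=
    solG_nodup _ _ _ _ (by decide)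
  have h2 : (solutionWalk
      (solutionWalk (PySem.Set.ofList [((0 : Int), (0 : Int))]) (0, 0)
        (solutionSplit2 (PySem.List.pyGetD inp 0 "").toList).1) (0, 0)
      (solutionSplit2 (PySem.List.pyGetD inp 0 "").toList).2).Nodup :=
    solutionWalk_nodup _ _ _ (solutionWalk_nodup _ _ _ (by decide))
  have hmem : ∀ y, y ∈ (solG (PySem.List.pyGetD inp 0 "").toList
      (PySem.Set.add PySem.Set.empty ((0 : Int), (0 : Int))) (0, 0) (0, 0)) ↔
      y ∈ (solutionWalk
        (solutionWalk (PySem.Set.ofList [((0 : Int), (0 : Int))]) (0, 0)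
          (solutionSplit2 (PySem.List.pyGetD inp 0 "").toList).1) (0, 0)
        (solutionSplit2 (PySem.List.pyGetD inp 0 "").toList).2) := by
    intro y
    rw [solG_mem, solutionWalk_mem, solutionWalk_mem, solPosG_split]
    simp [PySem.Set.mem_ofList]
    tauto
  have hperm := (List.perm_ext_iff_of_nodup h1 h2).2 hmem
  simp only [PySem.Set.len]
  rw [hperm.length_eq]
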